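-- pv_equiv track=rewrite | github.com/rogue-agent1/game-theory | game_theory.py | pure_nash
-- ===== SOURCE A (Python) =====
-- def pure_nash(payoff_matrix):
--     rows, cols = len(payoff_matrix), len(payoff_matrix[0])
--     equilibria = []
--     for i in range(rows):
--         for j in range(cols):
--             p1_best = all(payoff_matrix[i][j][0] >= payoff_matrix[k][j][0] for k in range(rows))
--             p2_best = all(payoff_matrix[i][j][1] >= payoff_matrix[i][k][1] for k in range(cols))
--             if p1_best and p2_best: equilibria.append((i, j))
--     return equilibria
-- ===== SOURCE B (Python) =====
-- def pure_nash(payoff_matrix):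
--     rows, cols = len(payoff_matrix), len(payoff_matrix[0])
--     if cols == 0:
--         return []
--     col_max = [max(payoff_matrix[k][j][0] for k in range(rows)) for j in range(cols)]
--     row_max = [max(payoff_matrix[i][k][1] for k in range(cols)) for i in range(rows)]
--     return [(i, j) for i in range(rows) for j in range(cols)
--             if payoff_matrix[i][j][0] == col_max[j] and payoff_matrix[i][j][1] == row_max[i]]
-- ===== Notes on version B (the rewrite author's own statement) =====
-- stated objective: faster
-- what changed: Precompute the per-column max of player-1 payoffs and per-row max of player-2 payoffs once, then decide each cell with two O(1) comparisons instead of re-scanning its row and column.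
import Mathlib
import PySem

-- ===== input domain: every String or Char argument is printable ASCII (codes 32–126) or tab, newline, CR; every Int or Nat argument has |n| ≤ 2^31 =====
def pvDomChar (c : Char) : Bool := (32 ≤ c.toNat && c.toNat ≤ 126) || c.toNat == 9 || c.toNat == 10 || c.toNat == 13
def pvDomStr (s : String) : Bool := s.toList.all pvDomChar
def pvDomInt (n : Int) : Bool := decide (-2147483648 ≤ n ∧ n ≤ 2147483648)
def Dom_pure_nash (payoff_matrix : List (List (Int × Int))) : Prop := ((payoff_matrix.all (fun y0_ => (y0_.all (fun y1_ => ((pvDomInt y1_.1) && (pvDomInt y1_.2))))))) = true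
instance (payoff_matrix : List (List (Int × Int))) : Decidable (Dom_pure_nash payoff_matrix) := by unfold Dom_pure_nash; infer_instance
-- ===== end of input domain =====

-- B precomputes per-column / per-row payoff maxima once, replacing A's per-cell row/column rescans (asymptotically faster).


-- ===== PORT A =====
def pure_nash (payoff_matrix : List (List (Int × Int))) : List (Int × Int) :=
  let rows := payoff_matrix.length
  let cols := (payoff_matrix.headD []).length
  (List.range rows).foldl (fun acc i =>
    (List.range cols).foldl (fun acc2 j =>
      let p1_best := (List.range rows).all (fun k =>
        ((payoff_matrix.getD i []).getD j ((0:Int),(0:Int))).1 ≥ ((payoff_matrix.getD k []).getD j ((0:Int),(0:Int))).1)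
      let p2_best := (List.range cols).all (fun k =>
        ((payoff_matrix.getD i []).getD j ((0:Int),(0:Int))).2 ≥ ((payoff_matrix.getD i []).getD k ((0:Int),(0:Int))).2)
      if p1_best && p2_best then acc2 ++ [((i:Int),(j:Int))] else acc2) acc) []

-- ===== PORT B =====
-- max() over a nonempty list of ints (Python's built-in max on a nonempty iterable)
def pvMaxInt : List Int → Int
  | [] => 0
  | x :: xs => xs.foldl max x

def pure_nash_alt (payoff_matrix : List (List (Int × Int))) : List (Int × Int) :=
  let rows := payoff_matrix.length
  let cols := (payoff_matrix.headD []).length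
  if cols = 0 then [] else
  let colMax := (List.range cols).map (fun j =>
    pvMaxInt ((List.range rows).map (fun k => ((payoff_matrix.getD k []).getD j ((0:Int),(0:Int))).1)))
  let rowMax := (List.range rows).map (fun i =>
    pvMaxInt ((List.range cols).map (fun k => ((payoff_matrix.getD i []).getD k ((0:Int),(0:Int))).2)))
  (List.range rows).flatMap (fun i =>
    ((List.range cols).filter (fun j =>
      ((payoff_matrix.getD i []).getD j ((0:Int),(0:Int))).1 == colMax.getD j 0 &&
      ((payoff_matrix.getD i []).getD j ((0:Int),(0:Int))).2 == rowMax.getD i 0)).map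
      (fun (j : Nat) => ((i:Int),(j:Int))))

-- ===== PRECONDITION & SPEC =====
-- Python A raises IndexError on an empty matrix (payoff_matrix[0]) and on a row shorter than row 0;
-- Pre_ excludes exactly those inputs.
def Pre_pure_nash (payoff_matrix : List (List (Int × Int))) : Prop :=
  payoff_matrix ≠ [] ∧ ∀ r ∈ payoff_matrix, (payoff_matrix.headD []).length ≤ r.length
instance (payoff_matrix : List (List (Int × Int))) : Decidable (Pre_pure_nash payoff_matrix) := by unfold Pre_pure_nash; infer_instance
def pvWitness_pure_nash : (List (List (Int × Int))) := [[(1,1),(0,0)],[(0,0),(2,2)]]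
def Spec_pure_nash (payoff_matrix : List (List (Int × Int))) (out : List (Int × Int)) : Prop := out = pure_nash_alt payoff_matrix
instance (payoff_matrix : List (List (Int × Int))) (out : List (Int × Int)) : Decidable (Spec_pure_nash payoff_matrix out) := by unfold Spec_pure_nash; infer_instance

-- ===== CLAIM (what is proved, stated in full; the proofs are below) =====
def Claim_equal_pure_nash : Prop := ∀ (payoff_matrix : List (List (Int × Int))), Dom_pure_nash payoff_matrix → Pre_pure_nash payoff_matrix → Spec_pure_nash payoff_matrix (pure_nash payoff_matrix)

-- ===== LEMMAS AND PROOFS =====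

-- a row-major double loop that conditionally appends (i, j) IS a filtered comprehension
theorem pv_nested_foldl (f : Nat → Nat → Bool) (R C : Nat) :
    (List.range R).foldl (fun acc i =>
      (List.range C).foldl (fun acc2 j =>
        if f i j then acc2 ++ [((i:Int),(j:Int))] else acc2) acc) []
    = (List.range R).flatMap (fun i =>
        ((List.range C).filter (f i)).map (fun (j : Nat) => ((i:Int),(j:Int)))) := by
  exact Eq.trans
    (PySem.List.foldl_congr_mem _ _
      (fun acc i => acc ++ ((List.range C).filter (f i)).map (fun (j : Nat) => ((i:Int),(j:Int)))) _
      (fun acc x _ => PySem.List.foldl_append_if _ _ _ _))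
    (by rw [PySem.List.foldl_append_eq_flatMap, List.nil_append])

-- "v is ≥ every element of l" is the same Bool as "v equals the max of l", when v ∈ l.
theorem pv_all_ge_eq_beq_max (l : List Int) (v : Int) (hv : v ∈ l) :
    (l.all (fun x => decide (v ≥ x))) = (v == pvMaxInt l) := by
  rcases l with _ | ⟨x, xs⟩
  · cases hv
  · rw [Bool.eq_iff_iff]
    simp only [List.all_eq_true, decide_eq_true_eq, beq_iff_eq, pvMaxInt]
    constructor
    · intro h
      have hmem := PySem.List.foldl_max_mem xs x
      have hle : xs.foldl max x ≤ v := by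
        rcases hmem with h1 | h1
        · rw [h1]; exact h x (List.mem_cons_self)
        · exact h _ (List.mem_cons_of_mem _ h1)
      have hge : v ≤ xs.foldl max x := by
        rcases List.mem_cons.mp hv with rfl | hv'
        · exact (PySem.List.le_foldl_max xs v).1
        · exact (PySem.List.le_foldl_max xs x).2 v hv'
      omega
    · intro h y hy
      rw [h]
      rcases List.mem_cons.mp hy with rfl | hy'
      · exact (PySem.List.le_foldl_max xs y).1
      · exact (PySem.List.le_foldl_max xs x).2 y hy'

-- projection form over an index range
theorem pv_all_ge_eq_beq_max_range (f : Nat → Int) (n i : Nat) (h : i < n) :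
    ((List.range n).all (fun k => decide (f i ≥ f k))) = (f i == pvMaxInt ((List.range n).map f)) := by
  have hm := pv_all_ge_eq_beq_max ((List.range n).map f) (f i)
    (List.mem_map_of_mem (List.mem_range.mpr h))
  rw [List.all_map] at hm
  simpa [Function.comp] using hm

theorem pure_nash_eq (payoff_matrix : List (List (Int × Int))) :
    pure_nash payoff_matrix = pure_nash_alt payoff_matrix := by
  unfold pure_nash pure_nash_alt
  set m := payoff_matrix
  set rows := m.length
  set cols := (m.headD []).length
  by_cases hc : cols = 0
  · simp [hc]
  · simp only [if_neg hc]
    rw [pv_nested_foldl]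
    apply List.flatMap_congr
    intro i hi
    congr 1
    apply List.filter_congr
    intro j hj
    rw [List.mem_range] at hi hj
    have h1 : ((List.range rows).all (fun k =>
        ((m.getD i []).getD j ((0:Int),(0:Int))).1 ≥ ((m.getD k []).getD j ((0:Int),(0:Int))).1))
        = (((m.getD i []).getD j ((0:Int),(0:Int))).1 ==
            ((List.range cols).map (fun j' =>
              pvMaxInt ((List.range rows).map (fun k => ((m.getD k []).getD j' ((0:Int),(0:Int))).1)))).getD j 0) := by
      rw [PySem.List.getD_map_range _ _ _ _ hj]
      exact pv_all_ge_eq_beq_max_range (fun k => ((m.getD k []).getD j ((0:Int),(0:Int))).1) rows i hi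
    have h2 : ((List.range cols).all (fun k =>
        ((m.getD i []).getD j ((0:Int),(0:Int))).2 ≥ ((m.getD i []).getD k ((0:Int),(0:Int))).2))
        = (((m.getD i []).getD j ((0:Int),(0:Int))).2 ==
            ((List.range rows).map (fun i' =>
              pvMaxInt ((List.range cols).map (fun k => ((m.getD i' []).getD k ((0:Int),(0:Int))).2)))).getD i 0) := by
      rw [PySem.List.getD_map_range _ _ _ _ hi]
      exact pv_all_ge_eq_beq_max_range (fun k => ((m.getD i []).getD k ((0:Int),(0:Int))).2) cols j hj
    rw [h1, h2]

-- ===== VERDICT (by name: the statement is the Claim_ definition above) =====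
theorem pure_nash_spec : Claim_equal_pure_nash := by
  intro m _ _
  unfold Spec_pure_nash
  exact pure_nash_eq m
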